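-- pv_equiv track=rewrite | github.com/nvanhilten/Evo-MD_curvature_sensing | run.py | _constrain_peptide_charge
-- ===== SOURCE A (Python) =====
-- def _constrain_peptide_charge(sequence):
--     CHARGE_THRESHOLD = 1 # x*2 when using mirror sequences.
--
--     positive = ["R", "K"] # Histidine left out at pH 7, map to one of single-protonated forms in CHARMM36
--     negative = ["D", "E"]
--
--     charge = 0
--     for x in positive:
--         charge += sequence.count(x)
--
--     for x in negative:
--         charge -= sequence.count(x)
--
--     return (abs(charge) > CHARGE_THRESHOLD)
-- ===== SOURCE B (Python) =====
-- def _constrain_peptide_charge(sequence):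
--     # Keep only the charged residues, count the positives among them, and
--     # recover the net charge algebraically: negatives = charged - positives,
--     # so charge = positives - negatives = 2*positives - len(charged).
--     charged = [c for c in sequence if c in "RKDE"]
--     positives = sum(1 for c in charged if c in "RK")
--     return abs(2 * positives - len(charged)) > 1
-- ===== Notes on version B (the rewrite author's own statement) =====
-- stated objective: alternative
-- what changed: B filters the sequence once to its charged residues and counts positives among them, deriving the net charge as 2*positives - len(charged) (correct because negatives = charged - positives), instead of A's four separate sequence.count scans combined by signed addition.
import Mathlib
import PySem

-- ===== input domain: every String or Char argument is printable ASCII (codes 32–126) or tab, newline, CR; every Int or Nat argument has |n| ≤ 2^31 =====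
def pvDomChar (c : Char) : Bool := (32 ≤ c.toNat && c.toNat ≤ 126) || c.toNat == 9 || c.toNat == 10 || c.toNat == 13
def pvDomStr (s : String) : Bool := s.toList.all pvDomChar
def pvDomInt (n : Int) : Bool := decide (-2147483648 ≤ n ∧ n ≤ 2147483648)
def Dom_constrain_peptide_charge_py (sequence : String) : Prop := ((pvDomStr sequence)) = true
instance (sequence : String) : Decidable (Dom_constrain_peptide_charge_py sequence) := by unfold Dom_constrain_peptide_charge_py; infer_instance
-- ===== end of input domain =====

-- B filters the sequence once to its charged residues, counts the positives among them, and
-- derives the net charge as 2*positives - len(charged), replacing A's four .count scans (alternative).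

-- ===== PORT A =====
def constrain_peptide_charge_py (sequence : String) : Bool :=
  let CHARGE_THRESHOLD : Int := 1
  let positive : List String := ["R", "K"]
  let negative : List String := ["D", "E"]
  let charge : Int := 0
  let charge : Int := positive.foldl (fun ch x => ch + (PySem.Str.count sequence x : Int)) charge
  let charge : Int := negative.foldl (fun ch x => ch - (PySem.Str.count sequence x : Int)) charge
  decide (CHARGE_THRESHOLD < |charge|)

-- ===== PORT B =====
-- 'c in "RKDE"' for a single char c is char membership; ported as membership in the char list
def constrain_peptide_charge_py_alt (sequence : String) : Bool :=
  let charged : List Char := sequence.toList.filter (fun c => ['R','K','D','E'].contains c)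
  let positives : Int := (charged.filter (fun c => ['R','K'].contains c)).length
  decide (1 < |2 * positives - (charged.length : Int)|)

-- ===== PRECONDITION & SPEC =====
def Spec_constrain_peptide_charge_py (sequence : String) (out : Bool) : Prop := out = constrain_peptide_charge_py_alt sequence
instance (sequence : String) (out : Bool) : Decidable (Spec_constrain_peptide_charge_py sequence out) := by unfold Spec_constrain_peptide_charge_py; infer_instance

-- ===== CLAIM (what is proved, stated in full; the proofs are below) =====
def Claim_equal_constrain_peptide_charge_py : Prop := ∀ (sequence : String), Dom_constrain_peptide_charge_py sequence → Spec_constrain_peptide_charge_py sequence (constrain_peptide_charge_py sequence)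

-- ===== LEMMAS AND PROOFS =====

theorem pv_go_single (c : Char) : ∀ (fuel : Nat) (l : List Char) (acc : Nat), l.length ≤ fuel →
    PySem.Chars.count.go [c] fuel l acc = acc + l.count c := by
  intro fuel
  induction fuel with
  | zero =>
    intro l acc h
    have hl : l = [] := List.eq_nil_of_length_eq_zero (by omega)
    subst hl; simp [PySem.Chars.count.go]
  | succ n ih =>
    intro l acc h
    cases l with
    | nil => simp [PySem.Chars.count.go]
    | cons x t =>
      rw [PySem.Chars.count.go]
      simp only [List.isPrefixOf, List.length] at *
      by_cases hc : c == x
      · simp [ih t (acc + 1) (by omega), (beq_iff_eq.mp hc).symm]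
        omega
      · simp [hc, ih t acc (by omega), List.count_cons]
        intro he; exact absurd (beq_iff_eq.mpr he.symm) (by simpa using hc)

theorem pv_count_single (s : List Char) (c : Char) : PySem.Chars.count s [c] = s.count c := by
  simp [PySem.Chars.count, pv_go_single c s.length s 0 le_rfl]

-- the net charge B derives from one filtered list equals the signed sum of A's four counts
theorem pv_filter_charge (l : List Char) :
    2 * (((l.filter (fun c => ['R','K','D','E'].contains c)).filter
            (fun c => ['R','K'].contains c)).length : Int)
        - ((l.filter (fun c => ['R','K','D','E'].contains c)).length : Int)
      = (l.count 'R' : Int) + l.count 'K' - l.count 'D' - l.count 'E' := by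
  induction l with
  | nil => simp
  | cons x t ih =>
    by_cases hR : x = 'R' <;> by_cases hK : x = 'K' <;> by_cases hD : x = 'D' <;>
      by_cases hE : x = 'E' <;>
      simp_all <;> omega

theorem constrain_peptide_charge_py_eq (sequence : String) :
    constrain_peptide_charge_py sequence = constrain_peptide_charge_py_alt sequence := by
  unfold constrain_peptide_charge_py constrain_peptide_charge_py_alt
  simp only [List.foldl_cons, List.foldl_nil, PySem.Str.count_eq]
  have hR := pv_count_single sequence.toList 'R'
  have hK := pv_count_single sequence.toList 'K'
  have hD := pv_count_single sequence.toList 'D'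
  have hE := pv_count_single sequence.toList 'E'
  have h := pv_filter_charge sequence.toList
  simp only [show ("R" : String).toList = ['R'] from rfl, show ("K" : String).toList = ['K'] from rfl,
    show ("D" : String).toList = ['D'] from rfl, show ("E" : String).toList = ['E'] from rfl,
    hR, hK, hD, hE]
  rw [h]; ring_nf

-- ===== VERDICT (by name: the statement is the Claim_ definition above) =====
theorem constrain_peptide_charge_py_spec : Claim_equal_constrain_peptide_charge_py := by
  intro sequence _
  unfold Spec_constrain_peptide_charge_py
  exact constrain_peptide_charge_py_eq sequence
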